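-- pv_equiv track=rewrite | github.com/skvcool-rgb/KOS-Organism | kos/grid_primitives.py | ray_fill_down
-- ===== SOURCE A (Python) =====
-- from typing import Any, Callable, Dict, List, Tuple
-- from collections import Counter
--
-- Grid = List[List[int]]
--
-- def color_counts(g: Grid) -> Counter:
--     return Counter(c for row in g for c in row)
--
-- def ray_fill_down(g: Grid) -> Grid:
--     """Extend each non-bg color downward until hitting another non-bg cell or edge."""
--     if not g or not g[0]: return g
--     bg = color_counts(g).most_common(1)[0][0]
--     rows, cols = len(g), len(g[0])
--     result = [row[:] for row in g]
--     for j in range(cols):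
--         for i in range(rows):
--             if g[i][j] != bg:
--                 for k in range(i+1, rows):
--                     if g[k][j] != bg:
--                         break
--                     result[k][j] = g[i][j]
--     return result
-- ===== SOURCE B (Python) =====
-- from collections import Counter
--
-- def ray_fill_down(g):
--     """Extend each non-bg color downward until hitting another non-bg cell or edge."""
--     if not g or not g[0]:
--         return g
--     bg = Counter(c for row in g for c in row).most_common(1)[0][0]
--     cols = len(g[0])
--     carry = [None] * cols
--     out = []
--     for row in g:
--         new = row[:]
--         for j in range(cols):
--             c = row[j]
--             if c != bg:
--                 carry[j] = c
--             elif carry[j] is not None: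
--                 new[j] = carry[j]
--         out.append(new)
--     return out
-- ===== Notes on version B (the rewrite author's own statement) =====
-- stated objective: alternative
-- what changed: B replaces A's column-major triple loop (for every non-bg cell, re-scan downward until the next non-bg cell) by a single top-down row pass that carries, per column, the last non-bg color seen and writes it into bg cells.
import Mathlib
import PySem

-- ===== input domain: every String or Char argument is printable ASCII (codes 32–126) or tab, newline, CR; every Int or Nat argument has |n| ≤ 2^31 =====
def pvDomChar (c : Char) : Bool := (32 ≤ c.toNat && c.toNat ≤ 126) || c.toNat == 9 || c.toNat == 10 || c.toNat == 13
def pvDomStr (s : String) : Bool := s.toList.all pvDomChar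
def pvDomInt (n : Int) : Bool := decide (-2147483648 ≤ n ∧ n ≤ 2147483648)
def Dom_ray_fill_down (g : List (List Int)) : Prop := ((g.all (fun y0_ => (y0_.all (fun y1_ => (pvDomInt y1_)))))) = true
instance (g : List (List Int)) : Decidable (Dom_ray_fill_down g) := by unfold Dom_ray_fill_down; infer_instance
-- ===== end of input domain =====

-- B re-implements A by a single top-down row pass carrying, per column, the last non-bg
-- color seen, instead of A's per-source downward re-scan of each column (a different
-- traversal of the grid). Equivalence of the return values is proved on Pre_ (rows at
-- least as long as row 0; on shorter rows A raises IndexError).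

-- ===== PORT A =====
-- shared helper: port of Counter(c for row in g for c in row).most_common(1)[0][0]
-- (most_common(1) returns the first key, in first-encounter order, with maximal count)
def pvFirstMax : List (Int × Int) → (Int × Int) → Int
  | [], best => best.1
  | p :: rest, best => pvFirstMax rest (if p.2 > best.2 then p else best)

def pvBg (g : List (List Int)) : Int :=
  match (PySem.Dict.counter (g.flatMap id)).items with
  | [] => 0   -- unreachable under the nonempty-grid guard
  | p :: rest => pvFirstMax rest p

-- g[i][j] (both indices in range on every admitted input)
def pvGet2 (g : List (List Int)) (i j : Nat) : Int := (g.getD i []).getD j 0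

-- result[k][j] = v
def pvSetCell (res : List (List Int)) (k j : Nat) (v : Int) : List (List Int) :=
  res.modify k (fun row => row.set j v)

-- 'for k in range(i+1, rows): if g[k][j] != bg: break; result[k][j] = g[i][j]'
def pvFillRun (g : List (List Int)) (bg v : Int) (j : Nat) : List Nat → List (List Int) → List (List Int)
  | [], res => res
  | k :: ks, res =>
    if pvGet2 g k j ≠ bg then res
    else pvFillRun g bg v j ks (pvSetCell res k j v)

-- 'for i in range(rows): if g[i][j] != bg: <run>'
def pvColPass (g : List (List Int)) (bg : Int) (rows j : Nat) : List Nat → List (List Int) → List (List Int)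
  | [], res => res
  | i :: is, res =>
    pvColPass g bg rows j is
      (if pvGet2 g i j ≠ bg then
        pvFillRun g bg (pvGet2 g i j) j (List.range' (i + 1) (rows - (i + 1))) res
       else res)

-- 'for j in range(cols): …'
def pvColsPass (g : List (List Int)) (bg : Int) (rows : Nat) : List Nat → List (List Int) → List (List Int)
  | [], res => res
  | j :: js, res => pvColsPass g bg rows js (pvColPass g bg rows j (List.range rows) res)

def ray_fill_down (g : List (List Int)) : List (List Int) :=
  if g = [] ∨ g.headD [] = [] then g
  else
    let bg := pvBg g
    let rows := g.length
    let cols := (g.headD []).length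
    pvColsPass g bg rows (List.range cols) g

-- ===== PORT B =====
-- one row against the carry list: new row cells and updated carry (zip-style recursion)
def pvFillRow (bg : Int) : List Int → List (Option Int) → List Int × List (Option Int)
  | row, [] => (row, [])
  | [], carry => ([], carry)
  | c :: row, k :: carry =>
    let rest := pvFillRow bg row carry
    if c ≠ bg then (c :: rest.1, some c :: rest.2)
    else (k.getD c :: rest.1, k :: rest.2)

-- top-down over the rows, threading the carry
def pvFillRows (bg : Int) : List (Option Int) → List (List Int) → List (List Int)
  | _, [] => []
  | carry, row :: rest =>
    let p := pvFillRow bg row carry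
    p.1 :: pvFillRows bg p.2 rest

def ray_fill_down_alt (g : List (List Int)) : List (List Int) :=
  if g = [] ∨ g.headD [] = [] then g
  else pvFillRows (pvBg g) (List.replicate (g.headD []).length none) g

-- ===== PRECONDITION & SPEC =====
-- Pre_ excludes exactly the grids on which A raises IndexError: a row shorter than row 0
-- (A reads g[i][j] for every j < len(g[0])).
def Pre_ray_fill_down (g : List (List Int)) : Prop :=
  ∀ row ∈ g, (g.headD []).length ≤ row.length
instance (g : List (List Int)) : Decidable (Pre_ray_fill_down g) := by
  unfold Pre_ray_fill_down; infer_instance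

def pvWitness_ray_fill_down : List (List Int) := [[1, 1], [2, 1]]

def Spec_ray_fill_down (g : List (List Int)) (out : List (List Int)) : Prop := out = ray_fill_down_alt g
instance (g : List (List Int)) (out : List (List Int)) : Decidable (Spec_ray_fill_down g out) := by unfold Spec_ray_fill_down; infer_instance

-- ===== CLAIM (what is proved, stated in full; the proofs are below) =====
def Claim_equal_ray_fill_down : Prop := ∀ (g : List (List Int)), Dom_ray_fill_down g → Pre_ray_fill_down g → Spec_ray_fill_down g (ray_fill_down g)

-- ===== LEMMAS AND PROOFS =====

-- last non-bg value of a list (the color a bg cell below this prefix receives)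
def pvLastNB (bg : Int) (l : List Int) : Option Int := (l.filter (fun x => x ≠ bg)).getLast?

-- last non-bg entry of column j among rows [a, b) of g
def pvColNB (g : List (List Int)) (bg : Int) (j a b : Nat) : Option Int :=
  pvLastNB bg (((g.drop a).take (b - a)).map (fun r => r.getD j 0))

-- the per-row effect of A's column pass j, as a row transformer
def pvStep (g : List (List Int)) (bg : Int) (t : Nat) (r : List Int) (j : Nat) : List Int :=
  match pvColNB g bg j 0 t with
  | some v => if pvGet2 g t j = bg ∧ t < g.length then r.set j v else r
  | none => r

theorem pvLastNB_cons (bg x : Int) (l : List Int) :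
    pvLastNB bg (x :: l) = (pvLastNB bg l).or (if x = bg then none else some x) := by
  unfold pvLastNB
  by_cases hx : x = bg
  · simp [hx]
  · have hfc : (x :: l).filter (fun y => decide (y ≠ bg)) = x :: l.filter (fun y => decide (y ≠ bg)) := by
      simp [hx]
    rw [hfc]
    generalize (List.filter _ l) = m
    cases m with
    | nil => simp [hx]
    | cons b tl =>
      rw [List.getLast?_cons_cons]
      cases h : (b :: tl).getLast? with
      | none => simp at h
      | some v => rfl

theorem pvLastNB_none_iff (bg : Int) (l : List Int) :
    pvLastNB bg l = none ↔ ∀ x ∈ l, x = bg := by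
  unfold pvLastNB
  rw [List.getLast?_eq_none_iff, List.filter_eq_nil_iff]
  simp

theorem pvColNB_none_iff (g : List (List Int)) (bg : Int) (j a b : Nat) :
    pvColNB g bg j a b = none ↔
      ∀ k, a ≤ k → k < b → k < g.length → pvGet2 g k j = bg := by
  rw [pvColNB, pvLastNB_none_iff]
  constructor
  · intro h k hak hkb hkl
    have hmem : ((g.drop a).take (b - a))[k - a]? = some g[k] := by
      rw [List.getElem?_take]
      simp only [if_pos (by omega : k - a < b - a)]
      rw [List.getElem?_drop]
      rw [List.getElem?_eq_getElem (by omega)]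
      congr 1
      congr 1
      omega
    have : g[k].getD j 0 ∈ ((g.drop a).take (b - a)).map (fun r => r.getD j 0) :=
      List.mem_map_of_mem (List.mem_of_getElem? hmem)
    have hbg := h _ this
    have hg : g.getD k [] = g[k] := by
      rw [List.getD_eq_getElem?_getD, List.getElem?_eq_getElem hkl]; rfl
    rw [pvGet2, hg]; exact hbg
  · intro h x hx
    obtain ⟨r, hr, rfl⟩ := List.mem_map.mp hx
    obtain ⟨i, hi⟩ := List.mem_iff_getElem?.mp hr
    rw [List.getElem?_take] at hi
    by_cases hib : i < b - a
    · rw [if_pos hib, List.getElem?_drop] at hi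
      have hlen : a + i < g.length := (List.getElem?_eq_some_iff.mp hi).1
      have hval := h (a + i) (by omega) (by omega) hlen
      have : r = g[a + i] := by
        have := List.getElem?_eq_getElem hlen
        rw [this] at hi; exact (Option.some_injective _ hi).symm
      rw [this]
      rw [pvGet2] at hval
      have hg : g.getD (a + i) [] = g[a + i] := by
        rw [List.getD_eq_getElem?_getD, List.getElem?_eq_getElem hlen]; rfl
      rw [hg] at hval
      exact hval
    · rw [if_neg hib] at hi; cases hi

theorem pvColNB_succ (g : List (List Int)) (bg : Int) (j m b : Nat)
    (hm : m < g.length) (hb : m < b) :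
    pvColNB g bg j m b =
      (pvColNB g bg j (m + 1) b).or (if pvGet2 g m j = bg then none else some (pvGet2 g m j)) := by
  unfold pvColNB
  rw [List.drop_eq_getElem_cons hm]
  rw [show b - m = (b - (m + 1)) + 1 by omega]
  rw [List.take_succ_cons, List.map_cons, pvLastNB_cons]
  have hgm : g.getD m [] = g[m] := by
    rw [List.getD_eq_getElem?_getD, List.getElem?_eq_getElem hm]; rfl
  have hg : g[m].getD j 0 = pvGet2 g m j := by rw [pvGet2, hgm]
  rw [hg]

theorem pvSetCell_getElem? (res : List (List Int)) (k j : Nat) (v : Int) (t : Nat) :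
    (pvSetCell res k j v)[t]? =
      if k = t then res[t]?.map (fun r => r.set j v) else res[t]? := by
  unfold pvSetCell
  rw [List.getElem?_modify]
  by_cases h : k = t <;> cases res[t]? <;> simp [h]

theorem pvFillRun_eq_foldl (g : List (List Int)) (bg v : Int) (j : Nat)
    (ks : List Nat) (res : List (List Int)) :
    pvFillRun g bg v j ks res =
      (ks.takeWhile (fun k => decide (pvGet2 g k j = bg))).foldl
        (fun r k => pvSetCell r k j v) res := by
  induction ks generalizing res with
  | nil => rfl
  | cons k ks ih =>
    unfold pvFillRun
    by_cases h : pvGet2 g k j = bg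
    · rw [if_neg (not_not_intro h), ih]
      simp [h]
    · rw [if_pos h]
      simp [h]

theorem pvFoldlSetCell_getElem? (j : Nat) (v : Int) (ws : List Nat)
    (res : List (List Int)) (t : Nat) :
    (ws.foldl (fun r k => pvSetCell r k j v) res)[t]? =
      if t ∈ ws then res[t]?.map (fun r => r.set j v) else res[t]? := by
  induction ws generalizing res with
  | nil => simp
  | cons a ws ih =>
    rw [List.foldl_cons, ih, pvSetCell_getElem?]
    by_cases hat : a = t
    · by_cases hmem : t ∈ ws <;> cases hr : res[t]? <;>
        simp [hat, hmem, List.set_set]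
    · have hne : ¬(t = a) := fun h => hat h.symm
      by_cases hmem : t ∈ ws <;> simp [hat, hne, hmem]

theorem pvMem_takeWhile_range' (p : Nat → Bool) (a n t : Nat) :
    t ∈ (List.range' a n).takeWhile p ↔
      (a ≤ t ∧ t < a + n ∧ ∀ k, a ≤ k → k ≤ t → p k = true) := by
  induction n generalizing a with
  | zero => simp [List.range']; omega
  | succ n ih =>
    rw [List.range'_succ, List.takeWhile_cons]
    by_cases hpa : p a = true
    · rw [if_pos hpa]
      constructor
      · intro ht
        rcases List.mem_cons.mp ht with rfl | ht
        · exact ⟨le_refl _, by omega, fun k hk1 hk2 => by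
            have : k = t := by omega
            subst this; exact hpa⟩
        · obtain ⟨h1, h2, h3⟩ := (ih (a + 1)).mp ht
          refine ⟨by omega, by omega, fun k hk1 hk2 => ?_⟩
          rcases Nat.eq_or_lt_of_le hk1 with rfl | hlt
          · exact hpa
          · exact h3 k (by omega) hk2
      · rintro ⟨h1, h2, h3⟩
        rcases Nat.eq_or_lt_of_le h1 with rfl | hlt
        · exact List.mem_cons_self ..
        · exact List.mem_cons_of_mem _ ((ih (a + 1)).mpr
            ⟨by omega, by omega, fun k hk1 hk2 => h3 k (by omega) hk2⟩)
    · rw [if_neg hpa]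
      simp only [List.not_mem_nil, false_iff]
      rintro ⟨h1, _, h3⟩
      exact hpa (h3 a (le_refl _) h1)

theorem pvColPass_char (g : List (List Int)) (bg : Int) (j : Nat) :
    ∀ (n m : Nat) (res : List (List Int)), m + n = g.length →
      ∀ t, (pvColPass g bg g.length j (List.range' m n) res)[t]? =
        match pvColNB g bg j m t with
        | some v => if pvGet2 g t j = bg ∧ t < g.length then res[t]?.map (fun r => r.set j v) else res[t]?
        | none => res[t]? := by
  intro n
  induction n with
  | zero =>
    intro m res hm t
    have hnone : pvColNB g bg j m t = none :=
      (pvColNB_none_iff g bg j m t).mpr (fun k hk1 _ hk3 => absurd hk3 (by omega))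
    rw [hnone]
    rfl
  | succ n ih =>
    intro m res hm t
    have hmlen : m < g.length := by omega
    rw [List.range'_succ]
    show (pvColPass g bg g.length j (m :: List.range' (m + 1) n) res)[t]? = _
    unfold pvColPass
    rw [ih (m + 1) _ (by omega) t]
    by_cases hbg : pvGet2 g m j = bg
    · rw [if_neg (not_not_intro hbg)]
      have heq : pvColNB g bg j (m + 1) t = pvColNB g bg j m t := by
        rcases (by omega : t ≤ m ∨ m < t) with hty | hty
        · rw [(pvColNB_none_iff g bg j (m + 1) t).mpr (fun k hk1 hk2 _ => absurd hk2 (by omega)),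
             (pvColNB_none_iff g bg j m t).mpr (fun k hk1 hk2 _ => absurd hk2 (by omega))]
        · rw [pvColNB_succ g bg j m t hmlen hty, if_pos hbg, Option.or_none]
      rw [heq]
    · rw [if_pos hbg]
      have hR1 : ∀ s, (pvFillRun g bg (pvGet2 g m j) j (List.range' (m + 1) (g.length - (m + 1))) res)[s]? =
          if s ∈ (List.range' (m + 1) (g.length - (m + 1))).takeWhile
              (fun k => decide (pvGet2 g k j = bg)) then
            res[s]?.map (fun r => r.set j (pvGet2 g m j))
          else res[s]? := by
        intro s
        rw [pvFillRun_eq_foldl, pvFoldlSetCell_getElem?]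
      rw [hR1 t]
      cases hc : pvColNB g bg j (m + 1) t with
      | some v =>
        have hex : ¬ ∀ k, m + 1 ≤ k → k < t → k < g.length → pvGet2 g k j = bg := by
          rw [← pvColNB_none_iff]; simp [hc]
        push Not at hex
        obtain ⟨k0, hk1, hk2, hk3, hk4⟩ := hex
        have hnot : t ∉ (List.range' (m + 1) (g.length - (m + 1))).takeWhile
            (fun k => decide (pvGet2 g k j = bg)) := by
          rw [pvMem_takeWhile_range']
          rintro ⟨h1, h2, h3⟩
          exact hk4 (by simpa using h3 k0 hk1 (le_of_lt hk2))
        rw [if_neg hnot]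
        rw [pvColNB_succ g bg j m t hmlen (by omega), hc, Option.some_or]
      | none =>
        have hall := (pvColNB_none_iff g bg j (m + 1) t).mp hc
        rcases (by omega : t ≤ m ∨ m < t) with hty | hty
        · have hnot : t ∉ (List.range' (m + 1) (g.length - (m + 1))).takeWhile
              (fun k => decide (pvGet2 g k j = bg)) := by
            rw [pvMem_takeWhile_range']
            rintro ⟨h1, _, _⟩; omega
          rw [if_neg hnot]
          rw [(pvColNB_none_iff g bg j m t).mpr (fun k hk1 hk2 _ => absurd hk2 (by omega))]
        · rw [pvColNB_succ g bg j m t hmlen hty, hc, if_neg hbg, Option.none_or]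
          by_cases hP : pvGet2 g t j = bg ∧ t < g.length
          · have hmem : t ∈ (List.range' (m + 1) (g.length - (m + 1))).takeWhile
                (fun k => decide (pvGet2 g k j = bg)) := by
              rw [pvMem_takeWhile_range']
              refine ⟨by omega, by omega, fun k hk1 hk2 => ?_⟩
              rcases Nat.eq_or_lt_of_le hk2 with rfl | hlt
              · simpa using hP.1
              · simpa using hall k hk1 hlt (by omega)
            rw [if_pos hmem]
            simp [hP]
          · have hnot : t ∉ (List.range' (m + 1) (g.length - (m + 1))).takeWhile
                (fun k => decide (pvGet2 g k j = bg)) := by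
              rw [pvMem_takeWhile_range']
              rintro ⟨h1, h2, h3⟩
              exact hP ⟨by simpa using h3 t h1 (le_refl _), by omega⟩
            rw [if_neg hnot]
            simp [hP]

-- the value A's pass over column j' writes into row t (none = cell untouched)
def pvGV (g : List (List Int)) (bg : Int) (t j' : Nat) : Option Int :=
  match pvColNB g bg j' 0 t with
  | some v => if pvGet2 g t j' = bg ∧ t < g.length then some v else none
  | none => none

theorem pvStep_length (g : List (List Int)) (bg : Int) (t : Nat) (r : List Int) (j : Nat) :
    (pvStep g bg t r j).length = r.length := by
  unfold pvStep
  cases pvColNB g bg j 0 t with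
  | none => rfl
  | some v => by_cases h : pvGet2 g t j = bg ∧ t < g.length <;> simp [h]

theorem pvStep_getElem?_self (g : List (List Int)) (bg : Int) (t : Nat) (r : List Int) (j' : Nat) :
    (pvStep g bg t r j')[j']? =
      match pvGV g bg t j' with
      | some v => if j' < r.length then some v else none
      | none => r[j']? := by
  unfold pvStep pvGV
  cases pvColNB g bg j' 0 t with
  | none => rfl
  | some v =>
    by_cases h : pvGet2 g t j' = bg ∧ t < g.length <;> simp [h, List.getElem?_set]

theorem pvStep_getElem?_ne (g : List (List Int)) (bg : Int) (t : Nat) (r : List Int)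
    (j0 j' : Nat) (h : j0 ≠ j') :
    (pvStep g bg t r j0)[j']? = r[j']? := by
  unfold pvStep
  cases pvColNB g bg j0 0 t with
  | none => rfl
  | some v =>
    by_cases hP : pvGet2 g t j0 = bg ∧ t < g.length <;> simp [hP, h]

theorem pvColsPass_getElem? (g : List (List Int)) (bg : Int) (js : List Nat) :
    ∀ (res : List (List Int)) (t : Nat),
      (pvColsPass g bg g.length js res)[t]? =
        res[t]?.map (fun r => js.foldl (pvStep g bg t) r) := by
  induction js with
  | nil => intro res t; unfold pvColsPass; cases h : res[t]? <;> simp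
  | cons j0 js ih =>
    intro res t
    show (pvColsPass g bg g.length js (pvColPass g bg g.length j0 (List.range g.length) res))[t]? = _
    rw [ih]
    have hcp : (pvColPass g bg g.length j0 (List.range g.length) res)[t]? =
        res[t]?.map (fun r => pvStep g bg t r j0) := by
      rw [List.range_eq_range', pvColPass_char g bg j0 g.length 0 res (by omega) t]
      unfold pvStep
      cases hc : pvColNB g bg j0 0 t with
      | none => cases res[t]? <;> rfl
      | some v =>
        by_cases hP : pvGet2 g t j0 = bg ∧ t < g.length <;> cases res[t]? <;> simp [hP]
    rw [hcp, Option.map_map]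
    rfl

theorem pvFoldlStep_getElem? (g : List (List Int)) (bg : Int) (t : Nat)
    (js : List Nat) (r : List Int) (j' : Nat) :
    (js.foldl (pvStep g bg t) r)[j']? =
      match (if j' ∈ js then pvGV g bg t j' else none) with
      | some v => if j' < r.length then some v else none
      | none => r[j']? := by
  induction js generalizing r with
  | nil => simp
  | cons j0 js ih =>
    rw [List.foldl_cons, ih]
    by_cases hj : j' ∈ js
    · rw [if_pos hj, if_pos (List.mem_cons_of_mem _ hj)]
      cases hgv : pvGV g bg t j' with
      | some v => simp [pvStep_length]
      | none =>
        by_cases hj0 : j0 = j'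
        · rw [hj0, pvStep_getElem?_self, hgv]
        · rw [pvStep_getElem?_ne g bg t r j0 j' hj0]
    · rw [if_neg hj]
      by_cases hj0 : j' = j0
      · subst hj0
        rw [if_pos (List.mem_cons_self ..)]
        exact pvStep_getElem?_self g bg t r j'
      · rw [if_neg (by simp [hj0, hj]), pvStep_getElem?_ne g bg t r j0 j' (fun h => hj0 h.symm)]

theorem pvFillRow_eq (bg : Int) :
    ∀ (row : List Int) (carry : List (Option Int)), carry.length ≤ row.length →
      pvFillRow bg row carry =
        (List.zipWith (fun c k => if c ≠ bg then c else k.getD c) row carry ++ row.drop carry.length,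
         List.zipWith (fun c k => if c ≠ bg then some c else k) row carry) := by
  intro row
  induction row with
  | nil =>
    intro carry hlen
    have : carry = [] := List.eq_nil_of_length_eq_zero (Nat.le_zero.mp (by simpa using hlen))
    subst this
    rfl
  | cons c row ih =>
    intro carry hlen
    cases carry with
    | nil => rfl
    | cons k carry =>
      unfold pvFillRow
      rw [ih carry (by simpa using hlen)]
      by_cases hc : c ≠ bg <;> simp [hc]

-- the carry after consuming a list of rows
def pvCarryN (bg : Int) (carry : List (Option Int)) (rows : List (List Int)) : List (Option Int) :=
  rows.foldl (fun c r => (pvFillRow bg r c).2) carry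

theorem pvFillRows_getElem? (bg : Int) :
    ∀ (rows : List (List Int)) (carry : List (Option Int)),
      (∀ r ∈ rows, carry.length ≤ r.length) →
      ∀ i, (pvFillRows bg carry rows)[i]? =
        (rows[i]?).map (fun r => (pvFillRow bg r (pvCarryN bg carry (rows.take i))).1) := by
  intro rows
  induction rows with
  | nil => intro carry _ i; simp [pvFillRows]
  | cons row rest ih =>
    intro carry hlen i
    unfold pvFillRows
    cases i with
    | zero => simp [pvCarryN]
    | succ i =>
      have hrow : carry.length ≤ row.length := hlen row (List.mem_cons_self ..)
      have hlen2 : (pvFillRow bg row carry).2.length = carry.length := by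
        rw [pvFillRow_eq bg row carry hrow]
        simp; omega
      rw [List.getElem?_cons_succ, ih (pvFillRow bg row carry).2
        (fun r hr => hlen2 ▸ hlen r (List.mem_cons_of_mem _ hr)) i]
      simp [pvCarryN]

theorem pvCarryN_length (bg : Int) (rows : List (List Int)) (carry : List (Option Int))
    (h : ∀ r ∈ rows, carry.length ≤ r.length) :
    (pvCarryN bg carry rows).length = carry.length := by
  induction rows generalizing carry with
  | nil => rfl
  | cons row rest ih =>
    have hrow : carry.length ≤ row.length := h row (List.mem_cons_self ..)
    have hlen2 : (pvFillRow bg row carry).2.length = carry.length := by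
      rw [pvFillRow_eq bg row carry hrow]
      simp; omega
    unfold pvCarryN
    rw [List.foldl_cons]
    have := ih (pvFillRow bg row carry).2
      (fun r hr => hlen2 ▸ h r (List.mem_cons_of_mem _ hr))
    unfold pvCarryN at this
    rw [this, hlen2]

theorem pvCarryN_getElem? (bg : Int) :
    ∀ (rows : List (List Int)) (carry : List (Option Int)),
      (∀ r ∈ rows, carry.length ≤ r.length) →
      ∀ j, (pvCarryN bg carry rows)[j]? =
        (carry[j]?).map (fun k => (pvLastNB bg (rows.map (fun r => r.getD j 0))).or k) := by
  intro rows
  induction rows with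
  | nil =>
    intro carry _ j
    unfold pvCarryN
    cases h : carry[j]? <;> simp [pvLastNB, h]
  | cons row rest ih =>
    intro carry hlen j
    have hrow : carry.length ≤ row.length := hlen row (List.mem_cons_self ..)
    have hfr := pvFillRow_eq bg row carry hrow
    have hlen2 : (pvFillRow bg row carry).2.length = carry.length := by
      rw [hfr]; simp; omega
    unfold pvCarryN
    rw [List.foldl_cons]
    have := ih (pvFillRow bg row carry).2
      (fun r hr => hlen2 ▸ hlen r (List.mem_cons_of_mem _ hr)) j
    unfold pvCarryN at this
    rw [this]
    rw [hfr]
    simp only [List.getElem?_zipWith]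
    cases hcj : carry[j]? with
    | none =>
      have : row[j]? = row[j]? := rfl
      cases row[j]? <;> simp
    | some k =>
      have hjc : j < carry.length := by
        by_contra hx
        rw [List.getElem?_eq_none_iff.mpr (by omega)] at hcj
        cases hcj
      have hjr : j < row.length := by omega
      rw [List.getElem?_eq_getElem hjr]
      simp only [List.map_cons, pvLastNB_cons, Option.map_some]
      have hgd : row.getD j 0 = row[j] := by
        rw [List.getD_eq_getElem?_getD, List.getElem?_eq_getElem hjr]; rfl
      rw [hgd]
      by_cases hbg : row[j] = bg
      · simp [hbg]
      · simp [hbg]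

-- ===== VERDICT (by name: the statement is the Claim_ definition above) =====
theorem ray_fill_down_spec : Claim_equal_ray_fill_down := by
  intro g _hdom hpre
  unfold Spec_ray_fill_down ray_fill_down ray_fill_down_alt
  by_cases hg : g = [] ∨ g.headD [] = []
  · rw [if_pos hg, if_pos hg]
  · rw [if_neg hg, if_neg hg]
    show pvColsPass g (pvBg g) g.length (List.range (g.headD []).length) g =
      pvFillRows (pvBg g) (List.replicate (g.headD []).length none) g
    set bg := pvBg g with hbgdef
    set cols := (g.headD []).length with hcolsdef
    have hpre' : ∀ r ∈ g, cols ≤ r.length := fun r hr => hpre r hr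
    have hrep : ∀ r ∈ g, (List.replicate cols (none : Option Int)).length ≤ r.length := by
      intro r hr; simpa using hpre' r hr
    apply List.ext_getElem?
    intro t
    rw [pvColsPass_getElem? g bg (List.range cols) g t,
        pvFillRows_getElem? bg g (List.replicate cols none) hrep t]
    cases hgt : g[t]? with
    | none => rfl
    | some r =>
      have htlen : t < g.length := by
        by_contra hx
        rw [List.getElem?_eq_none_iff.mpr (by omega)] at hgt
        cases hgt
      have hrg : g[t] = r := by
        rw [List.getElem?_eq_getElem htlen] at hgt
        exact Option.some.inj hgt
      have hrmem : r ∈ g := hrg ▸ List.getElem_mem _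
      have hrlen : cols ≤ r.length := hpre' r hrmem
      have htk : ∀ r' ∈ g.take t, (List.replicate cols (none : Option Int)).length ≤ r'.length :=
        fun r' hr' => hrep r' (List.mem_of_mem_take hr')
      have hclen : (pvCarryN bg (List.replicate cols none) (g.take t)).length = cols := by
        rw [pvCarryN_length bg (g.take t) _ htk]
        simp
      simp only [Option.map_some]
      congr 1
      have hfr1 : (pvFillRow bg r (pvCarryN bg (List.replicate cols none) (List.take t g))).1 =
          List.zipWith (fun c k => if c ≠ bg then c else k.getD c) r
              (pvCarryN bg (List.replicate cols none) (List.take t g)) ++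
            r.drop (pvCarryN bg (List.replicate cols none) (List.take t g)).length := by
        rw [pvFillRow_eq bg r _ (by rw [hclen]; exact hrlen)]
      rw [hfr1, hclen]
      have hzlen : (List.zipWith (fun c k => if c ≠ bg then c else k.getD c) r
          (pvCarryN bg (List.replicate cols none) (g.take t))).length = cols := by
        simp [hclen]
        omega
      apply List.ext_getElem?
      intro j'
      rw [pvFoldlStep_getElem? g bg t (List.range cols) r j']
      by_cases hj : j' < cols
      · rw [if_pos (List.mem_range.mpr hj)]
        rw [List.getElem?_append_left (by rw [hzlen]; exact hj)]
        rw [List.getElem?_zipWith]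
        have hjr : j' < r.length := by omega
        rw [List.getElem?_eq_getElem hjr]
        have hct : (pvCarryN bg (List.replicate cols none) (g.take t))[j']? =
            some (pvLastNB bg ((g.take t).map (fun row => row.getD j' 0))) := by
          rw [pvCarryN_getElem? bg (g.take t) _ htk j']
          simp [hj]
        rw [hct]
        have hg2 : pvGet2 g t j' = r[j'] := by
          rw [pvGet2]
          have hgd : g.getD t [] = r := by
            rw [List.getD_eq_getElem?_getD, hgt]
            rfl
          rw [hgd, List.getD_eq_getElem?_getD, List.getElem?_eq_getElem hjr]
          rfl
        have hcol : pvColNB g bg j' 0 t =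
            pvLastNB bg ((g.take t).map (fun row => row.getD j' 0)) := by
          unfold pvColNB
          rw [List.drop_zero, Nat.sub_zero]
        unfold pvGV
        rw [hcol]
        cases hnb : pvLastNB bg ((g.take t).map (fun row => row.getD j' 0)) with
        | none =>
          by_cases hbg2 : r[j'] = bg <;> simp [hbg2]
        | some v =>
          by_cases hbg2 : r[j'] = bg
          · have hPt : pvGet2 g t j' = bg := by rw [hg2, hbg2]
            simp [hPt, htlen, hjr, hbg2]
          · have hPf : ¬(pvGet2 g t j' = bg ∧ t < g.length) := by
              rw [hg2]
              tauto
            simp [hPf, hbg2]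
      · rw [if_neg (by simpa using hj)]
        show r[j']? = _
        rw [List.getElem?_append_right (hzlen.trans_le (by omega))]
        rw [List.getElem?_drop]
        congr 1
        simp only [List.length_zipWith, hclen]
        omega
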